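-- pv_equiv track=rewrite | github.com/NagarjunK98/DSA | geeksforgeeks/1.2_pointer_approach/6.apple_sequence.py | appleSequences
-- ===== SOURCE A (Python) =====
-- def appleSequences(n, m, arr):
--     l = 0
--     max_apple_len = 0
--     orange_count = 0
--     for r in range(n):
--         if arr[r] == 'O':
--             orange_count += 1
--         while orange_count > m:
--             if arr[l] == 'O':
--                 orange_count -= 1
--             l+=1
--         max_apple_len = max(max_apple_len, r-l+1)
--     return max_apple_len
-- ===== SOURCE B (Python) =====
-- def appleSequences(n, m, arr):
--     if n <= 0:
--         return 0
--     ox = [i for i in range(n) if arr[i] == 'O']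
--     k = len(ox)
--     if k <= m:
--         return n
--     P = [-1] + ox + [n]
--     return max(P[i + m + 1] - P[i] - 1 for i in range(k - m + 1))
-- ===== Notes on version B (the rewrite author's own statement) =====
-- stated objective: alternative
-- what changed: Replaces the two-pointer sliding-window scan by an orange-index gap table: B collects the indices of 'O' entries, returns n when there are at most m of them, and otherwise takes the maximum span P[i+m+1]-P[i]-1 over the sentinel-padded index table P=[-1]+ox+[n].
-- outside the precondition, e.g. on appleSequences(1, -1, ['OO', '', 'O', 'OOOOO']): A returns 0, B returns -1
import Mathlib
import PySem

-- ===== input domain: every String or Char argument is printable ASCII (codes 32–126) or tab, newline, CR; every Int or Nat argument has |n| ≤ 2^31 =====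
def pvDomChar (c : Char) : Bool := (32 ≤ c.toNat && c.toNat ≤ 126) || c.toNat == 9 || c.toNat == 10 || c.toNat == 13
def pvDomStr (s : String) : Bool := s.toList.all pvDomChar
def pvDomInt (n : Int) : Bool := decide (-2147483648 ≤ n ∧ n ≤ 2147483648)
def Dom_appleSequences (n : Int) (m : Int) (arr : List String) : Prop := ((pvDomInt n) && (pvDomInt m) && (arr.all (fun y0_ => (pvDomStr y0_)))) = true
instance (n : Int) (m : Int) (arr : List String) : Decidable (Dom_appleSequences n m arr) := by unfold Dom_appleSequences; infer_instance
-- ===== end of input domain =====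

-- B replaces A's two-pointer sliding window by a gap-table pass over orange indices; same O(n) cost, different algorithm.


-- ===== PORT A =====
-- the inner 'while orange_count > m' loop, with fuel (each iteration advances l by 1;
-- inside Pre_ the loop always stops with l ≤ r+1 ≤ arr.length, so fuel arr.length+1 is never exhausted)
def aWhile (arr : List String) (m : Int) : Nat → Int → Int → Int × Int
  | 0, l, cnt => (l, cnt)
  | fuel+1, l, cnt =>
    if m < cnt then
      aWhile arr m fuel (l + 1) (if (PySem.List.pyGet? arr l).getD "" = "O" then cnt - 1 else cnt)
    else (l, cnt)

def appleSequences (n : Int) (m : Int) (arr : List String) : Int :=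
  let s := (PySem.List.pyRange 0 n 1).foldl
    (fun (s : Int × Int × Int) r =>
      let cnt := if (PySem.List.pyGet? arr r).getD "" = "O" then s.2.2 + 1 else s.2.2
      let p := aWhile arr m (arr.length + 1) s.1 cnt
      (p.1, max s.2.1 (r - p.1 + 1), p.2))
    (0, 0, 0)
  s.2.1

-- ===== PORT B =====
def appleSequences_alt (n : Int) (m : Int) (arr : List String) : Int :=
  if n ≤ 0 then 0
  else
    let ox := (PySem.List.pyRange 0 n 1).filter
      (fun i => decide ((PySem.List.pyGet? arr i).getD "" = "O"))
    let k : Int := ox.length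
    if k ≤ m then n
    else
      let P := [-1] ++ ox ++ [n]
      let vals := (PySem.List.pyRange 0 (k - m + 1) 1).map
        (fun i => (PySem.List.pyGet? P (i + m + 1)).getD 0 - (PySem.List.pyGet? P i).getD 0 - 1)
      (PySem.List.max? vals (fun x => x)).getD 0

-- ===== PRECONDITION & SPEC =====
-- Pre_ excludes n > len(arr), where A raises IndexError at arr[r], and m < 0 with n ≥ 1, where
-- A's inner while scans l past index n: there it usually raises IndexError and otherwise returns
-- an accidental value that depends on elements beyond n, outside the task's natural domain.
def Pre_appleSequences (n : Int) (m : Int) (arr : List String) : Prop :=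
  n ≤ 0 ∨ (0 ≤ m ∧ n ≤ (arr.length : Int))
instance (n : Int) (m : Int) (arr : List String) : Decidable (Pre_appleSequences n m arr) := by
  unfold Pre_appleSequences; infer_instance

def pvWitness_appleSequences : Int × Int × List String := (3, 1, ["A", "O", "A"])

def Spec_appleSequences (n : Int) (m : Int) (arr : List String) (out : Int) : Prop := out = appleSequences_alt n m arr
instance (n : Int) (m : Int) (arr : List String) (out : Int) : Decidable (Spec_appleSequences n m arr out) := by unfold Spec_appleSequences; infer_instance

-- ===== CLAIM (what is proved, stated in full; the proofs are below) =====
def Claim_equal_appleSequences : Prop := ∀ (n : Int) (m : Int) (arr : List String), Dom_appleSequences n m arr → Pre_appleSequences n m arr → Spec_appleSequences n m arr (appleSequences n m arr)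

-- ===== LEMMAS AND PROOFS =====

-- 'arr[j] is an orange', as both ports test it
def oF (arr : List String) (j : Nat) : Bool := decide ((PySem.List.pyGet? arr (j : Int)).getD "" = "O")
-- number of oranges among indices 0..t-1
def cF (arr : List String) (t : Nat) : Nat := (List.range t).countP (oF arr)
-- the left pointer A's while loop settles at after processing index t-1: least l with c t - c l ≤ m
def fI (arr : List String) (m : Int) (t : Nat) : Nat :=
  Nat.find (p := fun l => (cF arr t : Int) - cF arr l ≤ m ∨ l = t) ⟨t, Or.inr rfl⟩
-- A's running maximum after t iterations
def bestA (arr : List String) (m : Int) : Nat → Int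
  | 0 => 0
  | t+1 => max (bestA arr m t) ((t : Int) - fI arr m (t+1) + 1)


-- ---- counting facts ----

theorem cF_zero (arr : List String) : cF arr 0 = 0 := rfl

theorem cF_succ (arr : List String) (t : Nat) :
    cF arr (t+1) = cF arr t + (if oF arr t then 1 else 0) := by
  simp [cF, List.range_succ, List.countP_append, List.countP_cons]

theorem cF_mono (arr : List String) {t t' : Nat} (h : t ≤ t') : cF arr t ≤ cF arr t' :=
  List.Sublist.countP_le (List.range_sublist.mpr h)

-- ---- the left pointer fI ----

theorem fI_spec (arr : List String) (m : Int) (t : Nat) (hm : 0 ≤ m) :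
    ((cF arr t : Int) - cF arr (fI arr m t) ≤ m) ∧
    (∀ j, j < fI arr m t → m < (cF arr t : Int) - cF arr j) ∧ fI arr m t ≤ t := by
  unfold fI
  refine ⟨?_, ?_, ?_⟩
  · rcases Nat.find_spec (p := fun l => (cF arr t : Int) - cF arr l ≤ m ∨ l = t)
      ⟨t, Or.inr rfl⟩ with h | h
    · exact h
    · rw [h]; simpa using hm
  · intro j hj
    have h := Nat.find_min (p := fun l => (cF arr t : Int) - cF arr l ≤ m ∨ l = t)
      ⟨t, Or.inr rfl⟩ hj
    push_neg at h
    omega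
  · exact Nat.find_min' _ (Or.inr rfl)

theorem fI_mono (arr : List String) (m : Int) (hm : 0 ≤ m) {t t' : Nat} (h : t ≤ t') :
    fI arr m t ≤ fI arr m t' := by
  by_contra h'
  push_neg at h'
  have h1 := (fI_spec arr m t' hm).1
  have h2 := (fI_spec arr m t hm).2.1 _ h'
  have h3 := cF_mono arr h
  omega

theorem fI_zero (arr : List String) (m : Int) (t : Nat) (hm : 0 ≤ m)
    (h : (cF arr t : Int) ≤ m) : fI arr m t = 0 := by
  unfold fI
  refine Nat.le_zero.mp (Nat.find_min' _ (Or.inl ?_))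
  rw [cF_zero]
  omega

-- ---- the inner while loop ----

theorem aWhile_spec (arr : List String) (m : Int) (t : Nat) (hm : 0 ≤ m) :
    ∀ fuel l, l ≤ fI arr m t → fI arr m t - l ≤ fuel →
      aWhile arr m fuel (l : Int) ((cF arr t : Int) - cF arr l) =
        ((fI arr m t : Int), (cF arr t : Int) - cF arr (fI arr m t)) := by
  intro fuel
  induction fuel with
  | zero =>
    intro l hl hfuel
    have h : l = fI arr m t := by omega
    subst h
    simp [aWhile]
  | succ fuel ih =>
    intro l hl hfuel
    rw [aWhile]
    by_cases hlt : l < fI arr m t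
    · rw [if_pos ((fI_spec arr m t hm).2.1 l hlt)]
      have hstep : cF arr (l+1) =
          cF arr l + (if (PySem.List.pyGet? arr (l : Int)).getD "" = "O" then 1 else 0) := by
        rw [cF_succ]; simp [oF]
      have hc : (if (PySem.List.pyGet? arr (l : Int)).getD "" = "O"
            then (cF arr t : Int) - cF arr l - 1 else (cF arr t : Int) - cF arr l)
          = (cF arr t : Int) - cF arr (l+1) := by
        split_ifs with ho
        · rw [hstep, if_pos ho]; push_cast; ring
        · rw [hstep, if_neg ho]; push_cast; ring
      have hcast : (l : Int) + 1 = ((l + 1 : Nat) : Int) := by push_cast; ring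
      rw [hc, hcast]
      exact ih (l+1) (by omega) (by omega)
    · have h : l = fI arr m t := by omega
      subst h
      rw [if_neg (by have := (fI_spec arr m t hm).1; omega)]

-- ---- A's outer loop ----

theorem foldA (arr : List String) (m : Int) (hm : 0 ≤ m) :
    ∀ t, t ≤ arr.length →
      ((List.range t).map (fun k : Nat => (k : Int))).foldl
        (fun (s : Int × Int × Int) r =>
          let cnt := if (PySem.List.pyGet? arr r).getD "" = "O" then s.2.2 + 1 else s.2.2
          let p := aWhile arr m (arr.length + 1) s.1 cnt
          (p.1, max s.2.1 (r - p.1 + 1), p.2)) (0, 0, 0)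
      = ((fI arr m t : Int), bestA arr m t, (cF arr t : Int) - cF arr (fI arr m t)) := by
  intro t
  induction t with
  | zero =>
    intro _
    have h0 : fI arr m 0 = 0 := fI_zero arr m 0 hm (by rw [cF_zero]; omega)
    simp [bestA, h0, cF_zero]
  | succ t ih =>
    intro ht
    rw [List.range_succ, List.map_append, List.foldl_append, ih (by omega)]
    simp only [List.map_cons, List.map_nil, List.foldl_cons, List.foldl_nil]
    have hstep : cF arr (t+1) =
        cF arr t + (if (PySem.List.pyGet? arr (t : Int)).getD "" = "O" then 1 else 0) := by
      rw [cF_succ]; simp [oF]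
    have hcnt : (if (PySem.List.pyGet? arr (t : Int)).getD "" = "O"
          then (cF arr t : Int) - cF arr (fI arr m t) + 1
          else (cF arr t : Int) - cF arr (fI arr m t))
        = (cF arr (t+1) : Int) - cF arr (fI arr m t) := by
      split_ifs with ho
      · rw [hstep, if_pos ho]; push_cast; ring
      · rw [hstep, if_neg ho]; push_cast; ring
    simp only [hcnt]
    have hw := aWhile_spec arr m (t+1) hm (arr.length + 1) (fI arr m t)
      (fI_mono arr m hm (Nat.le_succ t))
      (by have := (fI_spec arr m (t+1) hm).2.2; omega)
    rw [hw]
    show (_, _, _) = (_, _, _)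
    refine congrArg₂ _ rfl (congrArg₂ _ ?_ rfl)
    show max (bestA arr m t) ((t : Int) - (fI arr m (t+1) : Int) + 1) = bestA arr m (t+1)
    rfl

theorem A_eq (arr : List String) (m : Int) (hm : 0 ≤ m) (n : Int) (hn : 0 < n)
    (hN : n ≤ (arr.length : Int)) :
    appleSequences n m arr = bestA arr m n.toNat := by
  unfold appleSequences
  have h1 : n = ((n.toNat : Nat) : Int) := by omega
  rw [h1, PySem.List.pyRange_zero_natCast, foldA arr m hm n.toNat (by omega)]
  rw [Int.toNat_natCast]



-- ---- B side: the orange index table ----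

-- the orange indices among 0..N-1
def oxL (arr : List String) (N : Nat) : List Nat := (List.range N).filter (oF arr)
-- B's sentinel-padded table P = [-1] + ox + [n]
def PL (arr : List String) (N : Nat) : List Int :=
  -1 :: ((oxL arr N).map (fun j : Nat => (j : Int)) ++ [(N : Int)])
def PD (arr : List String) (N : Nat) (j : Nat) : Int := (PL arr N).getD j 0
-- B's candidate value for window class i
def valB (arr : List String) (N M i : Nat) : Int :=
  PD arr N (i + M + 1) - PD arr N i - 1

theorem cF_len (arr : List String) (N : Nat) : cF arr N = (oxL arr N).length :=
  List.countP_eq_length_filter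

theorem oxL_spec (arr : List String) (N : Nat) :
    ∀ j, j < (oxL arr N).length →
      cF arr ((oxL arr N).getD j 0) = j ∧ oF arr ((oxL arr N).getD j 0) = true ∧
        (oxL arr N).getD j 0 < N := by
  induction N with
  | zero => intro j hj; simp [oxL] at hj
  | succ N ih =>
    intro j hj
    have hox : oxL arr (N+1) = oxL arr N ++ (if oF arr N = true then [N] else []) := by
      simp only [oxL, List.range_succ, List.filter_append]
      cases h : oF arr N <;> simp [h]
    rw [hox] at hj ⊢
    by_cases hjl : j < (oxL arr N).length
    · rw [List.getD_append _ _ _ _ hjl]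
      obtain ⟨h1, h2, h3⟩ := ih j hjl
      exact ⟨h1, h2, by omega⟩
    · by_cases hoN : oF arr N = true
      · rw [if_pos hoN] at hj ⊢
        simp only [List.length_append, List.length_singleton] at hj
        have hj' : j = (oxL arr N).length := by omega
        subst hj'
        have hget : (oxL arr N ++ [N]).getD (oxL arr N).length 0 = N := by
          simp [List.getD_eq_getElem?_getD, List.getElem?_append_right (le_refl _)]
        rw [hget]
        exact ⟨cF_len arr N, hoN, by omega⟩
      · rw [if_neg hoN] at hj
        simp at hj
        omega

theorem le_oxL (arr : List String) (N j : Nat) (hj : j < (oxL arr N).length)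
    (t : Nat) (h : cF arr t ≤ j) : t ≤ (oxL arr N).getD j 0 := by
  by_contra h'
  push_neg at h'
  obtain ⟨h1, h2, _⟩ := oxL_spec arr N j hj
  have h3 : cF arr ((oxL arr N).getD j 0 + 1) = j + 1 := by
    rw [cF_succ, h1, h2]; simp
  have h4 := cF_mono arr (show (oxL arr N).getD j 0 + 1 ≤ t by omega)
  omega

theorem fI_eq_oxL (arr : List String) (m : Int) (t N : Nat) (hm : 0 ≤ m)
    (htN : t ≤ N) (h : m < (cF arr t : Int)) :
    fI arr m t = (oxL arr N).getD (cF arr t - m.toNat - 1) 0 + 1 := by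
  have hj : cF arr t - m.toNat - 1 < (oxL arr N).length := by
    rw [← cF_len]
    have := cF_mono arr htN
    omega
  obtain ⟨h1, h2, _⟩ := oxL_spec arr N (cF arr t - m.toNat - 1) hj
  have h3 : cF arr ((oxL arr N).getD (cF arr t - m.toNat - 1) 0 + 1)
      = cF arr t - m.toNat := by
    rw [cF_succ, h1, h2]; simp; omega
  apply le_antisymm
  · unfold fI
    apply Nat.find_min'
    left
    rw [h3]
    omega
  · by_contra h4
    push_neg at h4
    have h5 := (fI_spec arr m t hm).1
    have h6 := cF_mono arr (show fI arr m t ≤ (oxL arr N).getD (cF arr t - m.toNat - 1) 0 by omega)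
    rw [h1] at h6
    omega

-- ---- bestA facts ----

theorem bestA_nonneg (arr : List String) (m : Int) : ∀ T, 0 ≤ bestA arr m T := by
  intro T
  induction T with
  | zero => simp [bestA]
  | succ T ih => exact le_trans ih (le_max_left _ _)

theorem bestA_le_succ (arr : List String) (m : Int) (t : Nat) :
    bestA arr m t ≤ bestA arr m (t+1) := le_max_left _ _

theorem bestA_mono (arr : List String) (m : Int) {t t' : Nat} (h : t ≤ t') :
    bestA arr m t ≤ bestA arr m t' := by
  induction t' with
  | zero => have : t = 0 := by omega
            subst this; exact le_refl _
  | succ t' ih =>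
    by_cases h' : t ≤ t'
    · exact le_trans (ih h') (bestA_le_succ arr m t')
    · have : t = t' + 1 := by omega
      subst this; exact le_refl _

theorem bestGe (arr : List String) (m : Int) (hm : 0 ≤ m) (T t : Nat)
    (h1 : 1 ≤ t) (h2 : t ≤ T) : (t : Int) - fI arr m t ≤ bestA arr m T := by
  refine le_trans ?_ (bestA_mono arr m h2)
  obtain ⟨t', rfl⟩ : ∃ t', t = t' + 1 := ⟨t - 1, by omega⟩
  show _ ≤ max _ _
  refine le_trans (le_of_eq ?_) (le_max_right _ _)
  push_cast
  ring

theorem bestA_all (arr : List String) (m : Int) (hm : 0 ≤ m) :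
    ∀ t, (cF arr t : Int) ≤ m → bestA arr m t = t := by
  intro t
  induction t with
  | zero => intro _; rfl
  | succ t ih =>
    intro h
    have hct : (cF arr t : Int) ≤ m := by
      have := cF_mono arr (show t ≤ t + 1 by omega)
      omega
    have hb := ih hct
    have hf := fI_zero arr m (t+1) hm h
    show max (bestA arr m t) ((t : Int) - ((fI arr m (t+1) : Nat) : Int) + 1) = ((t+1 : Nat) : Int)
    rw [hb, hf]
    push_cast
    omega

-- ---- PD lemmas ----

theorem PD_zero (arr : List String) (N : Nat) : PD arr N 0 = -1 := rfl

theorem PD_mid (arr : List String) (N j : Nat) (hj : j < (oxL arr N).length) :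
    PD arr N (j+1) = ((oxL arr N).getD j 0 : Int) := by
  have hjm : j < ((oxL arr N).map (fun j : Nat => (j : Int))).length := by simpa using hj
  simp [PD, PL, List.getD_eq_getElem?_getD, List.getElem?_append_left hjm,
    List.getElem?_map, List.getElem?_eq_getElem hj]

theorem PD_last (arr : List String) (N : Nat) :
    PD arr N ((oxL arr N).length + 1) = (N : Int) := by
  simp only [PD, PL, List.getD_eq_getElem?_getD, List.getElem?_cons_succ]
  rw [List.getElem?_append_right (by simp)]
  simp

-- ---- B's port computes the max over valB ----

theorem B_eq (arr : List String) (m n : Int) (hm : 0 ≤ m) (hn : 0 < n) :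
    appleSequences_alt n m arr =
      (if (cF arr n.toNat : Int) ≤ m then n
       else (PySem.List.max?
         ((List.range (cF arr n.toNat - m.toNat + 1)).map (valB arr n.toNat m.toNat))
         (fun x => x)).getD 0) := by
  have h1 : n = ((n.toNat : Nat) : Int) := by omega
  have hcomp : ((fun i => decide ((PySem.List.pyGet? arr i).getD "" = "O")) ∘
      (fun k : Nat => (k : Int))) = oF arr := rfl
  have hox : (List.range n.toNat).filter (oF arr) = oxL arr n.toNat := rfl
  unfold appleSequences_alt
  rw [if_neg (by omega)]
  conv_lhs => rw [h1]
  rw [PySem.List.pyRange_zero_natCast, List.filter_map, hcomp, hox]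
  simp only [List.length_map]
  rw [← cF_len arr n.toNat]
  by_cases hk : (cF arr n.toNat : Int) ≤ m
  · rw [if_pos hk, if_pos hk]
    omega
  · rw [if_neg hk, if_neg hk]
    have hK : ((cF arr n.toNat : Nat) : Int) - m + 1 = ((cF arr n.toNat - m.toNat + 1 : Nat) : Int) := by
      omega
    rw [hK, PySem.List.pyRange_zero_natCast, List.map_map]
    congr 1
    refine congrArg (fun l => PySem.List.max? l (fun x : Int => x)) ?_
    apply List.map_congr_left
    intro i hi
    have hi' : i < cF arr n.toNat - m.toNat + 1 := List.mem_range.mp hi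
    have hP : ([-1] ++ (oxL arr n.toNat).map (fun j : Nat => (j : Int))) ++ [((n.toNat : Nat) : Int)]
        = PL arr n.toNat := by simp [PL]
    show (PySem.List.pyGet? _ ((i : Int) + m + 1)).getD 0 - (PySem.List.pyGet? _ (i : Int)).getD 0 - 1 = _
    rw [hP]
    have hc1 : (i : Int) + m + 1 = ((i + m.toNat + 1 : Nat) : Int) := by omega
    rw [hc1, PySem.List.pyGet?_natCast, PySem.List.pyGet?_natCast,
      ← List.getD_eq_getElem?_getD, ← List.getD_eq_getElem?_getD]
    rfl

-- ---- the crux: A's running maximum equals B's gap-table maximum ----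

theorem main_case (arr : List String) (m : Int) (N : Nat) (hm : 0 ≤ m)
    (hN1 : 1 ≤ N) (hk : m < (cF arr N : Int)) :
    bestA arr m N =
      (PySem.List.max? ((List.range (cF arr N - m.toNat + 1)).map (valB arr N m.toNat))
        (fun x => x)).getD 0 := by
  have hlen : cF arr N = (oxL arr N).length := cF_len arr N
  have hMlen : m.toNat < (oxL arr N).length := by omega
  obtain ⟨v, hv⟩ : ∃ v, PySem.List.max?
      ((List.range (cF arr N - m.toNat + 1)).map (valB arr N m.toNat)) (fun x => x) = some v := by
    cases h : PySem.List.max?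
        ((List.range (cF arr N - m.toNat + 1)).map (valB arr N m.toNat)) (fun x => x) with
    | none =>
      have := (PySem.List.max?_eq_none_iff _ _).mp h
      simp [List.range_eq_nil] at this
    | some v => exact ⟨v, rfl⟩
  rw [hv, Option.getD_some]
  have hval0 : valB arr N m.toNat 0 = ((oxL arr N).getD m.toNat 0 : Int) := by
    unfold valB
    rw [Nat.zero_add, PD_mid arr N m.toNat hMlen, PD_zero]
    ring
  have h0mem : valB arr N m.toNat 0 ∈
      (List.range (cF arr N - m.toNat + 1)).map (valB arr N m.toNat) :=
    List.mem_map_of_mem (List.mem_range.mpr (by omega))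
  have hv0 : valB arr N m.toNat 0 ≤ v := PySem.List.max?_id_le hv _ h0mem
  apply le_antisymm
  · -- bestA N ≤ v
    have hterm : ∀ t, 1 ≤ t → t ≤ N → (t : Int) - fI arr m t ≤ v := by
      intro t h1 h2
      by_cases hct : (cF arr t : Int) ≤ m
      · rw [fI_zero arr m t hm hct]
        have ht' := le_oxL arr N m.toNat hMlen t (by omega)
        omega
      · push_neg at hct
        have hcm := cF_mono arr h2
        have hfi := fI_eq_oxL arr m t N hm h2 hct
        have hmem : valB arr N m.toNat (cF arr t - m.toNat) ∈
            (List.range (cF arr N - m.toNat + 1)).map (valB arr N m.toNat) :=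
          List.mem_map_of_mem (List.mem_range.mpr (by omega))
        have hle := PySem.List.max?_id_le hv _ hmem
        have hj : cF arr t - m.toNat - 1 < (oxL arr N).length := by omega
        have hPDi : PD arr N (cF arr t - m.toNat)
            = ((oxL arr N).getD (cF arr t - m.toNat - 1) 0 : Int) := by
          have h := PD_mid arr N (cF arr t - m.toNat - 1) hj
          rwa [show cF arr t - m.toNat - 1 + 1 = cF arr t - m.toNat by omega] at h
        have hup : (t : Int) ≤ PD arr N (cF arr t - m.toNat + m.toNat + 1) := by
          rw [show cF arr t - m.toNat + m.toNat = cF arr t by omega]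
          by_cases hck : cF arr t < cF arr N
          · rw [PD_mid arr N (cF arr t) (by omega)]
            exact_mod_cast le_oxL arr N (cF arr t) (by omega) t (le_refl _)
          · have hceq : cF arr t = cF arr N := by omega
            rw [hceq, hlen, PD_last]
            exact_mod_cast h2
        have hvb : valB arr N m.toNat (cF arr t - m.toNat)
            = PD arr N (cF arr t - m.toNat + m.toNat + 1) - PD arr N (cF arr t - m.toNat) - 1 := rfl
        omega
    have haux : ∀ t, t ≤ N → bestA arr m t ≤ v := by
      intro t
      induction t with
      | zero =>
        intro _
        have h0 : (0 : Int) ≤ ((oxL arr N).getD m.toNat 0 : Int) := by positivity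
        show (0 : Int) ≤ v
        omega
      | succ t ih =>
        intro ht
        show max (bestA arr m t) ((t : Int) - ((fI arr m (t+1) : Nat) : Int) + 1) ≤ v
        refine max_le (ih (by omega)) ?_
        have h := hterm (t+1) (by omega) ht
        push_cast at h ⊢
        omega
    exact haux N (le_refl N)
  · -- v ≤ bestA N
    obtain ⟨i, hi, hvi⟩ := List.mem_map.mp (PySem.List.max?_mem hv)
    have hiK : i < cF arr N - m.toNat + 1 := List.mem_range.mp hi
    rw [← hvi]
    by_cases hik : i + m.toNat < cF arr N
    · have hilen : i + m.toNat < (oxL arr N).length := by omega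
      obtain ⟨hc1, hc2, hc3⟩ := oxL_spec arr N (i + m.toNat) hilen
      have hPDtop : PD arr N (i + m.toNat + 1) = ((oxL arr N).getD (i + m.toNat) 0 : Int) :=
        PD_mid arr N (i + m.toNat) hilen
      by_cases hi0 : i = 0
      · subst hi0
        have hvb : valB arr N m.toNat 0 = ((oxL arr N).getD (0 + m.toNat) 0 : Int) := by
          rw [Nat.zero_add] at *
          exact hval0
        by_cases ht0 : (oxL arr N).getD (0 + m.toNat) 0 = 0
        · rw [hvb, ht0]
          exact_mod_cast bestA_nonneg arr m N
        · have hfi := fI_zero arr m ((oxL arr N).getD (0 + m.toNat) 0) hm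
            (by rw [hc1]; push_cast; omega)
          have hbg := bestGe arr m hm N ((oxL arr N).getD (0 + m.toNat) 0) (by omega) (by omega)
          rw [hfi] at hbg
          omega
      · have hct : m < (cF arr ((oxL arr N).getD (i + m.toNat) 0) : Int) := by
          rw [hc1]; push_cast; omega
        have hfi := fI_eq_oxL arr m ((oxL arr N).getD (i + m.toNat) 0) N hm (by omega) hct
        rw [hc1, show i + m.toNat - m.toNat - 1 = i - 1 by omega] at hfi
        have hj : i - 1 < (oxL arr N).length := by omega
        have hPDi : PD arr N i = ((oxL arr N).getD (i - 1) 0 : Int) := by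
          have h := PD_mid arr N (i - 1) hj
          rwa [show i - 1 + 1 = i by omega] at h
        have ht1 : 1 ≤ (oxL arr N).getD (i + m.toNat) 0 := by
          by_contra h0
          have hz : (oxL arr N).getD (i + m.toNat) 0 = 0 := by omega
          rw [hz, cF_zero] at hc1
          omega
        have hbg := bestGe arr m hm N ((oxL arr N).getD (i + m.toNat) 0) ht1 (by omega)
        have hvb : valB arr N m.toNat i = PD arr N (i + m.toNat + 1) - PD arr N i - 1 := rfl
        omega
    · have hik' : i + m.toNat = cF arr N := by omega
      have hi1 : 1 ≤ i := by omega
      have hfi := fI_eq_oxL arr m N N hm (le_refl N) hk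
      rw [show cF arr N - m.toNat - 1 = i - 1 by omega] at hfi
      have hj : i - 1 < (oxL arr N).length := by omega
      have hPDi : PD arr N i = ((oxL arr N).getD (i - 1) 0 : Int) := by
        have h := PD_mid arr N (i - 1) hj
        rwa [show i - 1 + 1 = i by omega] at h
      have hPDtop : PD arr N (i + m.toNat + 1) = (N : Int) := by
        rw [show i + m.toNat + 1 = (oxL arr N).length + 1 by omega, PD_last]
      have hbg := bestGe arr m hm N N (by omega) (le_refl N)
      have hvb : valB arr N m.toNat i = PD arr N (i + m.toNat + 1) - PD arr N i - 1 := rfl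
      omega

-- ===== VERDICT (by name: the statement is the Claim_ definition above) =====
theorem appleSequences_spec : Claim_equal_appleSequences := by
  intro n m arr _ hpre
  unfold Spec_appleSequences
  by_cases hn : n ≤ 0
  · have hA : appleSequences n m arr = 0 := by
      unfold appleSequences
      rw [PySem.List.pyRange_one_eq_nil hn]
      rfl
    have hB : appleSequences_alt n m arr = 0 := by
      unfold appleSequences_alt
      rw [if_pos hn]
    rw [hA, hB]
  · push_neg at hn
    rcases hpre with h | ⟨hm, hN⟩
    · omega
    rw [A_eq arr m hm n hn hN, B_eq arr m n hm hn]
    by_cases hk : (cF arr n.toNat : Int) ≤ m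
    · rw [if_pos hk, bestA_all arr m hm n.toNat hk]
      omega
    · rw [if_neg hk]
      exact main_case arr m n.toNat hm (by omega) (by omega)
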